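-- pv_equiv track=rewrite | github.com/ivenpoker/Python-Projects | Projects/Online Workouts/w3resource/String/program-55.py | find_first_repeated_word
-- ===== SOURCE A (Python) =====
-- def find_first_repeated_word(main_str: str):
--     main_str = main_str.split(' ')
--     data = {}
--     for word in main_str:
--         if word in data:
--             data[word] += 1
--         else:
--             data[word] = 1
--     temp = [k for (k, v) in zip(data.keys(), data.values()) if v >= 2]
--     return None if len(temp) == 0 else temp[0]
-- ===== SOURCE B (Python) =====
-- def find_first_repeated_word(main_str: str):
--     words = main_str.split(' ')
--     for word in words:
--         if words.count(word) >= 2: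
--             return word
--     return None
-- ===== Notes on version B (the rewrite author's own statement) =====
-- stated objective: simpler
-- what changed: Replaces the dict-counting pass plus key-filter-and-index with a single ordered scan of the word list that returns the first word whose total count in the list is at least 2 (repeated list scans instead of a table).
import Mathlib
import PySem

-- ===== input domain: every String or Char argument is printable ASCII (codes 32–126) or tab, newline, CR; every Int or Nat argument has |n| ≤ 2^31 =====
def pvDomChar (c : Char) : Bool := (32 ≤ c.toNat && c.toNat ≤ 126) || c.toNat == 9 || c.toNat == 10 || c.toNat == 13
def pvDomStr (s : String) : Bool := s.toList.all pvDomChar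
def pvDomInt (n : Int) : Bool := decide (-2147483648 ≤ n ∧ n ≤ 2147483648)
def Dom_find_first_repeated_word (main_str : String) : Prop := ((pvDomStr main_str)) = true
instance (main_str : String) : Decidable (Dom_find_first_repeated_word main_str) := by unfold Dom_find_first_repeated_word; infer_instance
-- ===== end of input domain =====

-- B is a simpler single ordered scan (first word whose count in the list is ≥ 2) replacing A's
-- count-dict build plus key filter; same return value everywhere (A is total).

-- ===== PORT A =====
def find_first_repeated_word (main_str : String) : Option String :=
  let words := (PySem.Str.split? main_str " ").getD []
  let data := words.foldl
    (fun d w => if d.contains w then d.insert w (d.getD w 0 + 1) else d.insert w (1 : Int))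
    PySem.Dict.empty
  let temp := ((List.zip data.keys data.values).filter (fun kv => 2 ≤ kv.2)).map (·.1)
  if temp.length = 0 then none else temp[0]?

-- ===== PORT B =====
def find_first_repeated_word_alt (main_str : String) : Option String :=
  let words := (PySem.Str.split? main_str " ").getD []
  words.find? (fun w => 2 ≤ words.count w)

-- ===== PRECONDITION & SPEC =====
def Spec_find_first_repeated_word (main_str : String) (out : Option String) : Prop := out = find_first_repeated_word_alt main_str
instance (main_str : String) (out : Option String) : Decidable (Spec_find_first_repeated_word main_str out) := by unfold Spec_find_first_repeated_word; infer_instance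

-- ===== CLAIM (what is proved, stated in full; the proofs are below) =====
def Claim_equal_find_first_repeated_word : Prop := ∀ (main_str : String), Dom_find_first_repeated_word main_str → Spec_find_first_repeated_word main_str (find_first_repeated_word main_str)

-- ===== LEMMAS AND PROOFS =====

-- find? over a PySem set-fold accumulator: first match in the accumulator, else first match in the list
theorem find?_foldl_add {α : Type} [BEq α] [LawfulBEq α] (p : α → Bool) :
    ∀ (xs : List α) (s : PySem.Set α),
      List.find? p (List.foldl PySem.Set.add s xs) = (List.find? p s).or (List.find? p xs) := by
  intro xs
  induction xs with
  | nil => intro s; simp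
  | cons x xs ih =>
    intro s
    simp only [List.foldl_cons, ih, List.find?_cons]
    by_cases hc : s.contains x = true
    · simp only [PySem.Set.add, hc, if_true]
      by_cases hp : p x = true
      · have hmem : x ∈ s := by
          simpa using hc
        have : (List.find? p s).isSome := List.find?_isSome.mpr ⟨x, hmem, hp⟩
        obtain ⟨y, hy⟩ := Option.isSome_iff_exists.mp this
        simp [hy, hp]
      · simp [hp]
    · rw [show PySem.Set.add s x = s ++ [x] from by rw [PySem.Set.add, if_neg hc]]
      rw [List.find?_append, Option.or_assoc]
      by_cases hp : p x = true <;> simp [hp]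

-- dedup (first occurrences, in order) does not change the first element satisfying p
theorem find?_ofList {α : Type} [BEq α] [LawfulBEq α] (p : α → Bool) (xs : List α) :
    List.find? p (PySem.Set.ofList xs) = List.find? p xs := by
  simpa [PySem.Set.ofList, PySem.Set.empty] using find?_foldl_add p xs PySem.Set.empty

theorem counting_fold_eq (words : List String) :
    words.foldl
      (fun d w => if d.contains w then d.insert w (d.getD w 0 + 1) else d.insert w (1 : Int))
      PySem.Dict.empty = PySem.Dict.counter words := by
  rw [← PySem.Dict.foldl_insert_getD_add_one_eq_counter]
  congr 1
  funext d w
  by_cases hc : d.contains w = true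
  · simp [hc]
  · have : d.get? w = none :=
      (PySem.Dict.get?_eq_none_iff_contains d w).mpr (by simpa using hc)
    simp [hc, PySem.Dict.getD, this]

-- ===== VERDICT (by name: the statement is the Claim_ definition above) =====
theorem find_first_repeated_word_spec : Claim_equal_find_first_repeated_word := by
  intro main_str _
  unfold Spec_find_first_repeated_word find_first_repeated_word find_first_repeated_word_alt
  set words := (PySem.Str.split? main_str " ").getD [] with hw
  simp only [counting_fold_eq]
  have hkeys : (PySem.Dict.counter words).keys = (PySem.Dict.counter words).items.map Prod.fst := rfl
  have hvals : (PySem.Dict.counter words).values = (PySem.Dict.counter words).items.map Prod.snd := rfl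
  rw [hkeys, hvals, List.zip_map', PySem.Dict.items_counter]
  simp only [List.map_id']
  rw [List.filter_map, List.map_map]
  have hpred : ((fun kv : String × Int => decide (2 ≤ kv.2)) ∘ fun k => (k, (List.count k words : Int)))
      = fun k => decide (2 ≤ words.count k) := by
    funext k
    by_cases h : 2 ≤ words.count k <;> simp [h]
  rw [hpred]
  have hfst : ((fun x : String × Int => x.1) ∘ fun k => (k, (List.count k words : Int)))
      = fun k => k := funext fun _ => rfl
  rw [hfst]
  have : ∀ (l : List String) (q : String → Bool),
      (if ((l.filter q).map (fun k => k)).length = 0 then none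
        else ((l.filter q).map (fun k => k))[0]?) = List.find? q l := by
    intro l q
    simp only [List.map_id_fun', id]
    rw [List.head?_eq_getElem?.symm, ← List.head?_filter]
    cases h : l.filter q with
    | nil => simp
    | cons a t => simp
  rw [this, find?_ofList]
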